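-- pv_equiv track=rewrite | github.com/Oni-Men/APPythonRepository | dev/onimen/ap/python/Main.py | for_else_test1
-- ===== SOURCE A (Python) =====
-- def for_else_test1(stop_at):
-- 	"""
-- 	stop_atでループを終了する
--
-- 	>>> for_else_test1(5)
-- 	Don't finished...
-- 	>>> for_else_test1(15)
-- 	Finished!
-- 	"""
-- 	flag = True
-- 	for i in range(1, 10):
-- 		if i >= stop_at:
-- 			flag = False
-- 			break
-- 	if flag:
-- 		return "Finish!"
--
-- 	return "Don't finished..."
-- ===== SOURCE B (Python) =====
-- def for_else_test1(stop_at):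
--     return "Don't finished..." if stop_at <= 9 else "Finish!"
-- ===== Notes on version B (the rewrite author's own statement) =====
-- stated objective: simpler
-- what changed: Replaced the loop-and-flag construction with a single comparison of stop_at against the loop's largest index, returning the chosen string directly.
import Mathlib
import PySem

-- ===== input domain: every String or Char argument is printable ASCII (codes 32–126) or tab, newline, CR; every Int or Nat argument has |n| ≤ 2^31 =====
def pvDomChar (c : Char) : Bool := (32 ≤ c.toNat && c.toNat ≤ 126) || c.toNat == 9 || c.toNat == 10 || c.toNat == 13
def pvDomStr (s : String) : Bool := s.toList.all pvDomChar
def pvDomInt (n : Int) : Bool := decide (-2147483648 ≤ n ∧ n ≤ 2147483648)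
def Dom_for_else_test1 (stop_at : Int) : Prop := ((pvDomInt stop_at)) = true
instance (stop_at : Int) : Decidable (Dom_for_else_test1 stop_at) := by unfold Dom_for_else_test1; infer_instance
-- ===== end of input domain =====

-- ===== PORT A =====
-- loop over range(1,10): state = (flag, broken); breaking sets broken and flag := False
def forElseStep (stop_at : Int) (st : Bool × Bool) (i : Int) : Bool × Bool :=
  if st.2 then st  -- already broken
  else if i ≥ stop_at then (false, true) else st

def for_else_test1 (stop_at : Int) : String :=
  let flag := (PySem.List.pyRange 1 10 1).foldl (forElseStep stop_at) (true, false)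
  if flag.1 then "Finish!" else "Don't finished..."

-- ===== PORT B =====
def for_else_test1_alt (stop_at : Int) : String :=
  if stop_at ≤ 9 then "Don't finished..." else "Finish!"

-- ===== PRECONDITION & SPEC =====
def Spec_for_else_test1 (stop_at : Int) (out : String) : Prop := out = for_else_test1_alt stop_at
instance (stop_at : Int) (out : String) : Decidable (Spec_for_else_test1 stop_at out) := by unfold Spec_for_else_test1; infer_instance

-- ===== CLAIM (what is proved, stated in full; the proofs are below) =====
def Claim_equal_for_else_test1 : Prop := ∀ (stop_at : Int), Dom_for_else_test1 stop_at → Spec_for_else_test1 stop_at (for_else_test1 stop_at)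

-- ===== LEMMAS AND PROOFS =====

-- ===== VERDICT (by name: the statement is the Claim_ definition above) =====
lemma step_broken (stop_at : Int) (l : List Int) :
    l.foldl (forElseStep stop_at) (false, true) = (false, true) := by
  induction l with
  | nil => rfl
  | cons i l ih => simpa [forElseStep] using ih

lemma step_none (stop_at : Int) (l : List Int) (h : ∀ i ∈ l, i < stop_at) :
    l.foldl (forElseStep stop_at) (true, false) = (true, false) := by
  induction l with
  | nil => rfl
  | cons i l ih =>
    have hi := h i (by simp)
    simp only [List.foldl, forElseStep]
    rw [if_neg (by simp), if_neg (by omega)]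
    exact ih (fun j hj => h j (by simp [hj]))

lemma step_some (stop_at : Int) (l : List Int) (h : ∃ i ∈ l, i ≥ stop_at) :
    l.foldl (forElseStep stop_at) (true, false) = (false, true) := by
  induction l with
  | nil => simp at h
  | cons i l ih =>
    simp only [List.foldl, forElseStep]
    rw [if_neg (by simp)]
    by_cases hi : i ≥ stop_at
    · rw [if_pos hi]; exact step_broken stop_at l
    · rw [if_neg hi]
      rcases h with ⟨j, hj, hge⟩
      rcases List.mem_cons.mp hj with rfl | hmem
      · omega
      · exact ih ⟨j, hmem, hge⟩

-- ===== VERDICT =====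
theorem for_else_test1_spec : Claim_equal_for_else_test1 := by
  intro stop_at _
  unfold Spec_for_else_test1 for_else_test1 for_else_test1_alt
  have h : PySem.List.pyRange 1 10 1 = [1,2,3,4,5,6,7,8,9] := by decide
  rw [h]
  by_cases h9 : stop_at ≤ 9
  · rw [step_some stop_at _ ⟨9, by simp, by omega⟩]
    simp [h9]
  · rw [step_none stop_at _ (by intro i hi; fin_cases hi <;> omega)]
    simp [h9]
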